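-- pv_equiv track=rewrite | github.com/tmathmeyer/advent.of.code | 2025/10/solution.py | joltrec2
-- ===== SOURCE A (Python) =====
-- import functools
--
-- def jolt2target(jolt):
--   c = 0
--   d = 1
--   for n in jolt:
--     if n%2 == 1:
--       c += d
--     d *= 2
--   return c
--
-- def grps(i, v):
--   if i == 1:
--     for e in v:
--       yield [e]
--   elif 0 < i <= len(v):
--     for j,q in enumerate(v):
--       for sg in grps(i-1, v[j+1:]):
--         yield [q] + sg
--
-- def xorx2(t, v):
--   for i in range(len(v)+1):
--     for grp in grps(i, v):
--       c = t
--       for g in grp: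
--         c ^= g
--       if c == 0:
--         yield grp
--
-- def joltrec2(jolt, btns):
--   kz = list(btns.keys())
--   @functools.cache
--   def solve_jolt(jolt):
--     if all(v==0 for v in jolt): return 0
--     if all(v%2 == 0 for v in jolt):
--       return solve_jolt(tuple(v//2 for v in jolt)) * 2
--     answer = 9999999999999
--     for combo in xorx2(jolt2target(jolt), kz):
--       nj = list(jolt)
--       for btn in combo:
--         for dec in btns[btn]:
--           nj[dec] -= 1
--       if all(v>=0 and v%2==0 for v in nj):
--         nj = tuple([v//2 for v in nj])
--         value = solve_jolt(nj) * 2 + len(combo)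
--         if value <= answer:
--           answer = value
--     return answer
--   return solve_jolt(jolt)
-- ===== SOURCE B (Python) =====
-- import functools
--
-- def joltrec2(jolt, btns):
--   # Precompute, once, every subset of buttons as (presses, xor-of-keys, all decrements),
--   # instead of re-enumerating combinations inside every recursive call.
--   table = [(0, 0, ())]
--   for k in btns:
--     decs = tuple(btns[k])
--     table += [(cnt + 1, x ^ k, ds + decs) for (cnt, x, ds) in table]
--
--   @functools.cache
--   def solve(j):
--     if all(v == 0 for v in j):
--       return 0
--     if all(v % 2 == 0 for v in j):
--       return 2 * solve(tuple(v // 2 for v in j))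
--     t = 0
--     for i, v in enumerate(j):
--       if v % 2 != 0:
--         t += 1 << i
--     best = 9999999999999
--     for cnt, x, ds in table:
--       if x != t:
--         continue
--       nj = list(j)
--       for d in ds:
--         nj[d] -= 1
--       if all(v >= 0 and v % 2 == 0 for v in nj):
--         best = min(best, 2 * solve(tuple(v // 2 for v in nj)) + cnt)
--     return best
--
--   return solve(tuple(jolt))
-- ===== Notes on version B (the rewrite author's own statement) =====
-- stated objective: alternative
-- what changed: B precomputes once, before the recursion, the whole powerset of buttons as a flat table of (presses, xor-of-keys, concatenated decrement list) entries built by iterative doubling, and each recursive call just scans that table for xor matches against a bit-shift parity target, replacing A's recursive size-by-size grps/xorx2 generator machinery that re-enumerates all combinations inside every call.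
-- outside the precondition, e.g. on joltrec2((1,), {1: [0], 5: [3]}): A returns 1, B returns 1
import Mathlib
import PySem

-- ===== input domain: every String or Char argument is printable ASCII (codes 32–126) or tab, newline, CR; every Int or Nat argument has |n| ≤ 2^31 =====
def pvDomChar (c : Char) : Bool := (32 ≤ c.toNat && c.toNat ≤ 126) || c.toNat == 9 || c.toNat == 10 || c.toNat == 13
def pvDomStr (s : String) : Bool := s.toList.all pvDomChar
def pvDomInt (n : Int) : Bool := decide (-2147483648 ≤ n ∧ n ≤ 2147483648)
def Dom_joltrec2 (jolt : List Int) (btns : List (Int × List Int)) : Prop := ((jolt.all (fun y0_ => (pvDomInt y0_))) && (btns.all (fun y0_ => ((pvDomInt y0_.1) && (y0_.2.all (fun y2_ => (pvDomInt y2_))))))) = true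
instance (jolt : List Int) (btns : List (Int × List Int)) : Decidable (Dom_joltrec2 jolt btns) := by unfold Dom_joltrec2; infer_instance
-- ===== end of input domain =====

-- B precomputes the powerset of buttons (presses, xor of keys, decrement list) once instead of
-- re-enumerating size-by-size combinations (grps/xorx2) inside every recursive call; alternative decomposition.

-- ===== PORT A =====

-- c = 0; d = 1; for n in jolt: if n%2==1: c += d; d *= 2; return c
def jolt2targetA (jolt : List Int) : Int :=
  (jolt.foldl (fun (cd : Int × Int) n =>
    (if PySem.Int.mod n 2 == 1 then cd.1 + cd.2 else cd.1, cd.2 * 2)) ((0 : Int), (1 : Int))).1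

-- grps(i, v): size-i combinations of v (in order), as in A (generator materialised as a list)
def grpsA (i : Nat) (v : List Int) : List (List Int) :=
  if i = 1 then v.map (fun e => [e])
  else if h : 0 < i ∧ i ≤ v.length then
    (PySem.List.enumerate v).flatMap (fun jq =>
      (grpsA (i - 1) (PySem.List.slice v (some (jq.1 + 1)) none)).map (fun sg => jq.2 :: sg))
  else []
termination_by i
decreasing_by omega

-- xorx2(t, v): combos (of every size) whose xor with t is 0
def xorx2A (t : Int) (v : List Int) : List (List Int) :=
  (List.range (v.length + 1)).flatMap (fun i =>
    (grpsA i v).filter (fun grp => grp.foldl (fun c g => PySem.Int.bxor c g) t == 0))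

-- solve_jolt, with fuel standing in for the unbounded recursion (fuel = sum of |jolt| + 1 always suffices:
-- every recursive call strictly decreases that sum); functools.cache only memoises, it does not change the value
def solveA (btns : PySem.Dict Int (List Int)) (kz : List Int) : Nat → List Int → Int
  | 0, _ => 0
  | fuel + 1, jolt =>
    if jolt.all (fun v => v == 0) then 0
    else if jolt.all (fun v => PySem.Int.mod v 2 == 0) then
      solveA btns kz fuel (jolt.map (fun v => PySem.Int.floordiv v 2)) * 2
    else
      (xorx2A (jolt2targetA jolt) kz).foldl (fun answer combo =>
        let nj := combo.foldl (fun nj btn =>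
          (btns.getD btn []).foldl (fun nj dec =>
            PySem.List.pySetD nj dec (PySem.List.pyGetD nj dec 0 - 1)) nj) jolt
        if nj.all (fun v => decide (0 ≤ v) && (PySem.Int.mod v 2 == 0)) then
          let value := solveA btns kz fuel (nj.map (fun v => PySem.Int.floordiv v 2)) * 2 + (combo.length : Int)
          if value ≤ answer then value else answer
        else answer) 9999999999999

def joltrec2 (jolt : List Int) (btns : List (Int × List Int)) : Int :=
  let d := PySem.Dict.ofList btns
  solveA d d.keys ((jolt.map Int.natAbs).sum + 1) jolt

-- ===== PORT B =====

-- table built once over the keys: every subset as (presses, xor of keys, concatenated decrements)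
def tableB (d : PySem.Dict Int (List Int)) : List (Int × Int × List Int) :=
  d.keys.foldl (fun acc k =>
    acc ++ acc.map (fun e => (e.1 + 1, PySem.Int.bxor e.2.1 k, e.2.2 ++ d.getD k []))) [((0 : Int), (0 : Int), ([] : List Int))]

-- t = 0; for i, v in enumerate(j): if v % 2 != 0: t += 1 << i     (1 << i ported as 2 ^ i; exact, i ≥ 0)
def targetB (j : List Int) : Int :=
  (PySem.List.enumerate j).foldl (fun t iv =>
    if PySem.Int.mod iv.2 2 != 0 then t + 2 ^ iv.1.toNat else t) 0

def solveB (table : List (Int × Int × List Int)) : Nat → List Int → Int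
  | 0, _ => 0
  | fuel + 1, j =>
    if j.all (fun v => v == 0) then 0
    else if j.all (fun v => PySem.Int.mod v 2 == 0) then
      2 * solveB table fuel (j.map (fun v => PySem.Int.floordiv v 2))
    else
      let t := targetB j
      table.foldl (fun best e =>
        if e.2.1 == t then
          let nj := e.2.2.foldl (fun nj dec =>
            PySem.List.pySetD nj dec (PySem.List.pyGetD nj dec 0 - 1)) j
          if nj.all (fun v => decide (0 ≤ v) && (PySem.Int.mod v 2 == 0)) then
            min best (2 * solveB table fuel (nj.map (fun v => PySem.Int.floordiv v 2)) + e.1)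
          else best
        else best) 9999999999999

def joltrec2_alt (jolt : List Int) (btns : List (Int × List Int)) : Int :=
  let d := PySem.Dict.ofList btns
  solveB (tableB d) ((jolt.map Int.natAbs).sum + 1) jolt

-- ===== PRECONDITION & SPEC =====
-- keys of the dict, first-level parity target after stripping the common factors of 2 (2-adic formulation)
def pvKeysOf (btns : List (Int × List Int)) : List Int := PySem.List.dedup (btns.map Prod.fst)
def pvVmin (jolt : List Int) : Nat :=
  (((List.range 32).find? (fun v => !(jolt.all (fun n => decide ((2 ^ (v + 1) : Int) ∣ n)))))).getD 31
def pvMask (jolt : List Int) : Int :=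
  ((List.range jolt.length).map (fun i =>
    if ¬ ((2 ^ (pvVmin jolt + 1) : Int) ∣ jolt.getD i 0) then (2 ^ i : Int) else 0)).sum
-- Pre_ admits inputs on which no decrement can ever be applied out of range: either every decrement is a
-- valid (possibly negative, Python-style) index into jolt, or no subset of keys xors to the first parity
-- target (then the loop body never runs and both programs return at once). Outside Pre_ either program can
-- hit IndexError at nj[dec], depending on which xor-matching subsets the recursion reaches; on excluded
-- inputs where that never happens both programs still return and agree (Pre_ is narrower than the raise set).
def Pre_joltrec2 (jolt : List Int) (btns : List (Int × List Int)) : Prop :=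
  (∀ p ∈ btns, ∀ dec ∈ p.2, -(jolt.length : Int) ≤ dec ∧ dec < (jolt.length : Int))
  ∨ (∀ v ∈ jolt, v = 0)
  ∨ (∀ S ∈ (pvKeysOf btns).sublists, S.foldl PySem.Int.bxor 0 ≠ pvMask jolt)
instance (jolt : List Int) (btns : List (Int × List Int)) : Decidable (Pre_joltrec2 jolt btns) := by
  unfold Pre_joltrec2; infer_instance
def pvWitness_joltrec2 : List Int × (List (Int × List Int)) := ([1, 2], [(1, [0]), (2, [0, 1])])

def Spec_joltrec2 (jolt : List Int) (btns : List (Int × List Int)) (out : Int) : Prop := out = joltrec2_alt jolt btns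
instance (jolt : List Int) (btns : List (Int × List Int)) (out : Int) : Decidable (Spec_joltrec2 jolt btns out) := by unfold Spec_joltrec2; infer_instance

-- ===== CLAIM (what is proved, stated in full; the proofs are below) =====
def Claim_equal_joltrec2 : Prop := ∀ (jolt : List Int) (btns : List (Int × List Int)), Dom_joltrec2 jolt btns → Pre_joltrec2 jolt btns → Spec_joltrec2 jolt btns (joltrec2 jolt btns)


-- ===== LEMMAS AND PROOFS =====

-- ---- xor algebra ----
theorem bxor_coe_negSucc (m n : Nat) : PySem.Int.bxor (m : Int) (Int.negSucc n) = Int.negSucc (m ^^^ n) := by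
  simp only [PySem.Int.bxor]
  rw [if_pos (by omega), if_neg (by omega)]
  have h1 : ((-(Int.negSucc n) - 1).toNat) = n := by omega
  have h2 : (((m : Int)).toNat) = m := by omega
  rw [h1, h2]; omega

theorem bxor_negSucc_coe (m n : Nat) : PySem.Int.bxor (Int.negSucc m) (n : Int) = Int.negSucc (m ^^^ n) := by
  simp only [PySem.Int.bxor]
  rw [if_neg (by omega), if_pos (by omega)]
  have h1 : ((-(Int.negSucc m) - 1).toNat) = m := by omega
  have h2 : (((n : Int)).toNat) = n := by omega
  rw [h1, h2]; omega

theorem bxor_negSucc_negSucc (m n : Nat) : PySem.Int.bxor (Int.negSucc m) (Int.negSucc n) = ((m ^^^ n : Nat) : Int) := by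
  simp only [PySem.Int.bxor]
  rw [if_neg (by omega), if_neg (by omega)]
  have h1 : ((-(Int.negSucc m) - 1).toNat) = m := by omega
  have h2 : ((-(Int.negSucc n) - 1).toNat) = n := by omega
  rw [h1, h2]

theorem bxor_assoc (a b c : Int) :
    PySem.Int.bxor (PySem.Int.bxor a b) c = PySem.Int.bxor a (PySem.Int.bxor b c) := by
  cases a <;> cases b <;> cases c <;>
    simp only [Int.ofNat_eq_natCast, PySem.Int.bxor_natCast, bxor_coe_negSucc, bxor_negSucc_coe,
      bxor_negSucc_negSucc, Nat.xor_assoc]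

theorem bxor_left_cancel (t x : Int) : (PySem.Int.bxor t x = 0) ↔ x = t := by
  constructor
  · intro h
    have := congrArg (PySem.Int.bxor t) h
    rwa [← bxor_assoc, PySem.Int.bxor_self, PySem.Int.bxor_comm 0 x, PySem.Int.bxor_zero,
      PySem.Int.bxor_zero] at this
  · rintro rfl; exact PySem.Int.bxor_self _

theorem foldl_bxor_shift (l : List Int) : ∀ a : Int,
    l.foldl PySem.Int.bxor a = PySem.Int.bxor a (l.foldl PySem.Int.bxor 0) := by
  induction l with
  | nil => intro a; simp [PySem.Int.bxor_zero]
  | cons x xs ih =>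
    intro a
    simp only [List.foldl_cons]
    rw [ih (PySem.Int.bxor a x), ih (PySem.Int.bxor 0 x), ← bxor_assoc, ← bxor_assoc]
    congr 1
    rw [PySem.Int.bxor_zero]

-- ---- the parity target ----
theorem pymod_two (n : Int) : PySem.Int.mod n 2 = n % 2 := by
  show n.fmod 2 = n % 2
  rw [Int.fmod_eq_emod]
  omega

theorem mod_two_cases (n : Int) : PySem.Int.mod n 2 = 0 ∨ PySem.Int.mod n 2 = 1 := by
  rw [pymod_two]; omega

def tgtP : List Int → Int
  | [] => 0
  | n :: ns => (if PySem.Int.mod n 2 == 1 then 1 else 0) + 2 * tgtP ns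

theorem tgtP_nonneg (j : List Int) : 0 ≤ tgtP j := by
  induction j with
  | nil => simp [tgtP]
  | cons n ns ih => simp only [tgtP]; split <;> omega

theorem tgtP_pos (j : List Int) (h : ¬ (j.all (fun v => PySem.Int.mod v 2 == 0) = true)) :
    0 < tgtP j := by
  induction j with
  | nil => simp at h
  | cons n ns ih =>
    simp only [List.all_cons, Bool.and_eq_true, not_and_or] at h
    have hn := tgtP_nonneg ns
    rcases h with h | h
    · rcases mod_two_cases n with h0 | h1
      · rw [pymod_two] at h0
        simp [h0] at h
      · simp only [tgtP, h1]; norm_num; omega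
    · have := ih h
      simp only [tgtP]; split <;> omega

theorem targetA_eq_aux (j : List Int) : ∀ c d : Int,
    (j.foldl (fun (cd : Int × Int) n =>
      (if PySem.Int.mod n 2 == 1 then cd.1 + cd.2 else cd.1, cd.2 * 2)) (c, d)).1
      = c + d * tgtP j := by
  induction j with
  | nil => intro c d; simp [tgtP]
  | cons n ns ih =>
    intro c d
    simp only [List.foldl_cons, tgtP]
    rw [ih]
    split <;> ring

theorem targetB_eq_aux (j : List Int) : ∀ (s : Nat) (t0 : Int),
    (PySem.List.enumerate j (s : Int)).foldl (fun t iv =>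
      if PySem.Int.mod iv.2 2 != 0 then t + 2 ^ iv.1.toNat else t) t0
      = t0 + 2 ^ s * tgtP j := by
  induction j with
  | nil => intro s t0; simp [PySem.List.enumerate, tgtP]
  | cons n ns ih =>
    intro s t0
    rw [PySem.List.enumerate_cons]
    simp only [List.foldl_cons, tgtP]
    have hcast : ((s : Int) + 1) = ((s + 1 : Nat) : Int) := by omega
    rw [hcast, ih (s + 1)]
    have hne : ((if PySem.Int.mod n 2 != 0 then t0 + 2 ^ ((s : Int)).toNat else t0) : Int)
        = t0 + 2 ^ s * (if PySem.Int.mod n 2 == 1 then 1 else 0) := by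
      rw [pymod_two]
      have := Int.emod_two_eq_zero_or_one n
      rcases this with h | h <;> simp [h, Int.toNat_natCast]
    rw [hne]
    ring

theorem targetA_eq (j : List Int) : jolt2targetA j = tgtP j := by
  unfold jolt2targetA
  rw [targetA_eq_aux]; ring

theorem targetB_eq (j : List Int) : targetB j = tgtP j := by
  unfold targetB
  have h := targetB_eq_aux j 0 0
  simpa using h

-- ---- the subset enumerations ----
def S2 : List Int → List (List Int)
  | [] => [[]]
  | k :: ks => (S2 ks).flatMap (fun t => [t, k :: t])

def comboListA (v : List Int) : List (List Int) :=
  (List.range (v.length + 1)).flatMap (fun i => grpsA i v)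

theorem enumerate_shift {α : Type} (xs : List α) (s : Int) :
    PySem.List.enumerate xs (s + 1) = (PySem.List.enumerate xs s).map (fun p => (p.1 + 1, p.2)) := by
  induction xs generalizing s with
  | nil => simp [PySem.List.enumerate]
  | cons x xs ih => rw [PySem.List.enumerate_cons, PySem.List.enumerate_cons, List.map_cons, ih]

theorem grps_short (i : Nat) (v : List Int) (h : v.length < i) : grpsA i v = [] := by
  rw [grpsA]
  rcases eq_or_ne i 1 with h1 | h1
  · subst h1
    have : v = [] := by cases v <;> simp_all
    simp [this]
  · rw [if_neg h1, dif_neg (by omega)]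

theorem grps_cons (i : Nat) (x : Int) (xs : List Int) :
    grpsA (i + 1) (x :: xs)
      = ((if i = 0 then [[]] else grpsA i xs).map (fun sg => x :: sg)) ++ grpsA (i + 1) xs := by
  rcases eq_or_ne i 0 with rfl | hi
  · simp [grpsA]
  · rw [grpsA, if_neg (by omega), if_neg hi]
    by_cases hlen : i ≤ xs.length
    · rw [dif_pos (by simp; omega)]
      rw [PySem.List.enumerate_cons, List.flatMap_cons]
      have hsh : PySem.List.enumerate xs 1 = (PySem.List.enumerate xs 0).map (fun p => (p.1 + 1, p.2)) := by
        simpa using enumerate_shift xs 0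
      congr 1
      · rw [show ((0 : Int) + 1) = 1 by norm_num, PySem.List.slice_from_one]
        simp
      · rw [show ((0 : Int) + 1) = 1 by norm_num, hsh, List.flatMap_map]
        by_cases hlen2 : i + 1 ≤ xs.length
        · rw [grpsA, if_neg (by omega), dif_pos (by omega)]
          apply List.flatMap_congr
          intro p hp
          rw [PySem.List.mem_enumerate_iff] at hp
          obtain ⟨k, hk, rfl⟩ := hp
          simp only [zero_add, Nat.add_sub_cancel]
          congr 2
          rw [PySem.List.slice_from _ (by omega), PySem.List.slice_from _ (by omega)]
          have e1 : ((k : Int) + 1 + 1).toNat = k + 2 := by omega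
          have e2 : ((k : Int) + 1).toNat = k + 1 := by omega
          rw [e1, e2]
          rfl
        · rw [grps_short (i + 1) xs (by omega)]
          rw [List.flatMap_eq_nil_iff]
          intro p hp
          rw [PySem.List.mem_enumerate_iff] at hp
          obtain ⟨k, hk, rfl⟩ := hp
          simp only [zero_add, Nat.add_sub_cancel]
          rw [PySem.List.slice_from _ (by omega)]
          have e1 : ((k : Int) + 1 + 1).toNat = k + 2 := by omega
          rw [e1]
          have hsh2 : (List.drop (k + 2) (x :: xs)).length < i := by
            simp [List.length_drop]; omega
          rw [grps_short i _ hsh2]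
          rfl
    · rw [dif_neg (by simp; omega)]
      rw [grps_short i xs (by omega), grps_short (i + 1) xs (by omega)]
      simp

theorem grps_zero (v : List Int) : grpsA 0 v = [] := by
  rw [grpsA]; simp

theorem range_flatMap_head {β : Type} (n : Nat) (f : Nat → List β) :
    (List.range (n + 1)).flatMap f = f 0 ++ (List.range n).flatMap (fun j => f (j + 1)) := by
  rw [List.range_succ_eq_map, List.flatMap_cons, List.flatMap_map]

theorem flatMap_append_perm {α β : Type} (l : List α) (f g : α → List β) :
    List.Perm (l.flatMap fun x => f x ++ g x) (l.flatMap f ++ l.flatMap g) := by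
  induction l with
  | nil => simp
  | cons a l ih =>
    simp only [List.flatMap_cons]
    rw [List.append_assoc, List.append_assoc]
    have h1 : List.Perm (g a ++ (l.flatMap fun x => f x ++ g x)) (g a ++ (l.flatMap f ++ l.flatMap g)) :=
      List.Perm.append_left (g a) ih
    refine (List.Perm.append_left (f a) h1).trans (List.Perm.append_left (f a) ?_)
    rw [← List.append_assoc, ← List.append_assoc]
    exact List.Perm.append_right _ List.perm_append_comm

theorem interleave_perm (l : List (List Int)) (k : Int) :
    List.Perm (l.flatMap fun t => [t, k :: t]) (l ++ l.map (fun t => k :: t)) := by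
  induction l with
  | nil => simp
  | cons t l ih =>
    simp only [List.flatMap_cons, List.map_cons]
    refine List.Perm.cons t ?_
    exact (List.Perm.cons _ ih).trans List.perm_middle.symm

theorem comboList_perm (v : List Int) :
    List.Perm (([] : List Int) :: comboListA v) (S2 v) := by
  induction v with
  | nil =>
    show List.Perm ([] :: comboListA []) (S2 [])
    unfold comboListA
    simp [List.range_one, grps_zero, S2]
  | cons x xs ih =>
    have hR : comboListA xs = (List.range xs.length).flatMap (fun j => grpsA (j + 1) xs) := by
      unfold comboListA
      rw [range_flatMap_head, grps_zero, List.nil_append]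
    have hhead : comboListA (x :: xs)
        = (List.range (xs.length + 1)).flatMap (fun j => grpsA (j + 1) (x :: xs)) := by
      unfold comboListA
      simp only [List.length_cons]
      rw [range_flatMap_head, grps_zero, List.nil_append]
    have hsplit : (List.range (xs.length + 1)).flatMap (fun j => grpsA (j + 1) (x :: xs))
        = (List.range (xs.length + 1)).flatMap
            (fun j => ((if j = 0 then [[]] else grpsA j xs).map (fun sg => x :: sg)) ++ grpsA (j + 1) xs) := by
      exact List.flatMap_congr (fun j _ => grps_cons j x xs)
    have hH : (List.range (xs.length + 1)).flatMap (fun j => (if j = 0 then [[]] else grpsA j xs))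
        = [] :: comboListA xs := by
      rw [range_flatMap_head, List.flatMap_congr (fun j _ => if_neg (Nat.succ_ne_zero j)), ← hR]
      simp
    have hsecond : (List.range (xs.length + 1)).flatMap (fun j => grpsA (j + 1) xs)
        = comboListA xs := by
      rw [List.range_succ, List.flatMap_append]
      simp only [List.flatMap_cons, List.flatMap_nil, List.append_nil]
      rw [grps_short (xs.length + 1) xs (by omega), List.append_nil, hR]
    have kcore : List.Perm (comboListA (x :: xs))
        ((([] : List Int) :: comboListA xs).map (fun t => x :: t) ++ comboListA xs) := by
      rw [hhead, hsplit]
      refine (flatMap_append_perm _ _ _).trans ?_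
      rw [hsecond, ← List.map_flatMap, hH]
    refine (List.Perm.cons ([] : List Int) kcore).trans ?_
    show List.Perm ([] :: ((([] : List Int) :: comboListA xs).map _ ++ comboListA xs)) (S2 (x :: xs))
    refine (List.perm_middle.symm.trans ?_)
    refine List.perm_append_comm.trans ?_
    show List.Perm (([] :: comboListA xs) ++ (([] : List Int) :: comboListA xs).map (fun t => x :: t)) (S2 (x :: xs))
    have target : List.Perm (S2 (x :: xs)) (S2 xs ++ (S2 xs).map (fun t => x :: t)) := by
      show List.Perm ((S2 xs).flatMap fun t => [t, x :: t]) _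
      exact interleave_perm _ x
    refine List.Perm.trans ?_ target.symm
    exact List.Perm.append ih (ih.map _)

-- ---- the table ----
def entryOf (d : PySem.Dict Int (List Int)) (t : List Int) : Int × Int × List Int :=
  ((t.length : Int), t.foldl PySem.Int.bxor 0, t.flatMap (fun k => d.getD k []))

def combineE (d : PySem.Dict Int (List Int)) (e : Int × Int × List Int) (t : List Int) : Int × Int × List Int :=
  (e.1 + t.length, PySem.Int.bxor e.2.1 (t.foldl PySem.Int.bxor 0), e.2.2 ++ t.flatMap (fun k => d.getD k []))

theorem bxor_zero_left (x : Int) : PySem.Int.bxor 0 x = x := by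
  rw [PySem.Int.bxor_comm, PySem.Int.bxor_zero]

theorem combine_g (d : PySem.Dict Int (List Int)) (k : Int) (e : Int × Int × List Int) (t : List Int) :
    combineE d (e.1 + 1, PySem.Int.bxor e.2.1 k, e.2.2 ++ d.getD k []) t = combineE d e (k :: t) := by
  unfold combineE
  refine Prod.ext ?_ (Prod.ext ?_ ?_)
  · simp; ring
  · show PySem.Int.bxor (PySem.Int.bxor e.2.1 k) (t.foldl PySem.Int.bxor 0)
        = PySem.Int.bxor e.2.1 ((k :: t).foldl PySem.Int.bxor 0)
    rw [bxor_assoc]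
    congr 1
    rw [List.foldl_cons, foldl_bxor_shift t (PySem.Int.bxor 0 k), bxor_zero_left]
  · simp [List.append_assoc]

theorem table_inv (d : PySem.Dict Int (List Int)) (ks : List Int) :
    ∀ acc : List (Int × Int × List Int),
    ks.foldl (fun acc k =>
        acc ++ acc.map (fun e => (e.1 + 1, PySem.Int.bxor e.2.1 k, e.2.2 ++ d.getD k []))) acc
      = (S2 ks).flatMap (fun t => acc.map (fun e => combineE d e t)) := by
  induction ks with
  | nil =>
    intro acc
    show acc = [[]].flatMap (fun t => acc.map (fun e => combineE d e t))
    have hce : ∀ e : Int × Int × List Int, combineE d e [] = e := fun e => by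
      unfold combineE
      refine Prod.ext ?_ (Prod.ext ?_ ?_) <;> simp [PySem.Int.bxor_zero]
    simp [hce]
  | cons k ks ih =>
    intro acc
    rw [List.foldl_cons, ih]
    show (S2 ks).flatMap _ = ((S2 ks).flatMap fun t => [t, k :: t]).flatMap _
    rw [List.flatMap_assoc]
    refine List.flatMap_congr (fun t _ => ?_)
    simp only [List.flatMap_cons, List.flatMap_nil, List.append_nil, List.map_append, List.map_map]
    congr 1
    refine List.map_congr_left (fun e _ => ?_)
    exact combine_g d k e t

theorem tableB_eq (d : PySem.Dict Int (List Int)) :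
    tableB d = (S2 d.keys).map (entryOf d) := by
  unfold tableB
  rw [table_inv]
  have h1 : ∀ t, List.map (fun e => combineE d e t) [((0:Int), (0:Int), ([]:List Int))] = [entryOf d t] :=
    fun t => by simp [combineE, entryOf, bxor_zero_left]
  simp only [h1]
  induction S2 d.keys with
  | nil => rfl
  | cons t l ihh => simp_all [List.flatMap_cons]

theorem min_ify (a v : Int) : (if v ≤ a then v else a) = min a v := by
  rw [Int.min_def]; split_ifs <;> omega

def Gstep (d : PySem.Dict Int (List Int)) (tb : List (Int × Int × List Int)) (fuel : Nat)
    (tj : Int) (j : List Int) (answer : Int) (c : List Int) : Int :=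
  if (c.foldl PySem.Int.bxor 0) == tj then
    (let nj := (c.flatMap fun k => d.getD k []).foldl
        (fun nj dec => PySem.List.pySetD nj dec (PySem.List.pyGetD nj dec 0 - 1)) j
     if nj.all (fun v => decide (0 ≤ v) && (PySem.Int.mod v 2 == 0)) then
       min answer (2 * solveB tb fuel (nj.map (fun v => PySem.Int.floordiv v 2)) + (c.length : Int))
     else answer)
  else answer

def njOf (d : PySem.Dict Int (List Int)) (j : List Int) (c : List Int) : List Int :=
  (c.flatMap fun k => d.getD k []).foldl
    (fun nj dec => PySem.List.pySetD nj dec (PySem.List.pyGetD nj dec 0 - 1)) j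

theorem Gstep_eq (d : PySem.Dict Int (List Int)) (tb : List (Int × Int × List Int)) (fuel : Nat)
    (tj : Int) (j : List Int) (a : Int) (c : List Int) :
    Gstep d tb fuel tj j a c
      = if (((c.foldl PySem.Int.bxor 0) == tj)
            && ((njOf d j c).all (fun v => decide (0 ≤ v) && (PySem.Int.mod v 2 == 0)))) then
          min a (2 * solveB tb fuel ((njOf d j c).map (fun v => PySem.Int.floordiv v 2)) + (c.length : Int))
        else a := by
  unfold Gstep njOf
  split_ifs <;> simp_all

theorem Gstep_rcomm (d : PySem.Dict Int (List Int)) (tb : List (Int × Int × List Int)) (fuel : Nat)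
    (tj : Int) (j : List Int) : ∀ (a : Int) (c1 c2 : List Int),
    Gstep d tb fuel tj j (Gstep d tb fuel tj j a c1) c2
      = Gstep d tb fuel tj j (Gstep d tb fuel tj j a c2) c1 := by
  intro a c1 c2
  rw [Gstep_eq, Gstep_eq, Gstep_eq, Gstep_eq]
  split_ifs <;> omega

theorem solve_eq (d : PySem.Dict Int (List Int)) : ∀ (fuel : Nat) (j : List Int),
    solveA d d.keys fuel j = solveB (tableB d) fuel j := by
  intro fuel
  induction fuel with
  | zero => intro j; rfl
  | succ fuel ih =>
    intro j
    simp only [solveA, solveB]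
    split_ifs with h0 h1
    · rfl
    · rw [ih]; ring
    · -- the combo fold
      -- A side to a fold of Gstep over comboListA d.keys
      have hp : ∀ c : List Int,
          ((List.foldl (fun cc g => PySem.Int.bxor cc g) (jolt2targetA j) c) == 0)
            = ((c.foldl PySem.Int.bxor 0) == tgtP j) := by
        intro c
        rw [Bool.eq_iff_iff]
        simp only [beq_iff_eq]
        rw [show (List.foldl (fun cc g => PySem.Int.bxor cc g) (jolt2targetA j) c)
              = List.foldl PySem.Int.bxor (jolt2targetA j) c from rfl,
            foldl_bxor_shift, bxor_left_cancel, targetA_eq]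
      have hA : (xorx2A (jolt2targetA j) d.keys).foldl (fun answer combo =>
            let nj := combo.foldl (fun nj btn =>
              (d.getD btn []).foldl (fun nj dec =>
                PySem.List.pySetD nj dec (PySem.List.pyGetD nj dec 0 - 1)) nj) j
            if nj.all (fun v => decide (0 ≤ v) && (PySem.Int.mod v 2 == 0)) then
              let value := solveA d d.keys fuel (nj.map (fun v => PySem.Int.floordiv v 2)) * 2 + (combo.length : Int)
              if value ≤ answer then value else answer
            else answer) 9999999999999
          = (comboListA d.keys).foldl (Gstep d (tableB d) fuel (tgtP j) j) 9999999999999 := by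
        unfold xorx2A
        rw [← List.filter_flatMap]
        rw [show (List.range (d.keys.length + 1)).flatMap (fun i => grpsA i d.keys)
              = comboListA d.keys from rfl]
        rw [← PySem.List.foldl_if_eq_foldl_filter]
        refine PySem.List.foldl_congr_mem _ _ _ _ (fun acc c _ => ?_)
        rw [hp c]
        unfold Gstep
        by_cases hc : ((c.foldl PySem.Int.bxor 0) == tgtP j) = true
        · rw [if_pos hc, if_pos hc]
          simp only
          rw [← List.foldl_flatMap]
          set nj := (c.flatMap fun k => d.getD k []).foldl
            (fun nj dec => PySem.List.pySetD nj dec (PySem.List.pyGetD nj dec 0 - 1)) j with hnj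
          by_cases hchk : nj.all (fun v => decide (0 ≤ v) && (PySem.Int.mod v 2 == 0)) = true
          · rw [if_pos hchk, if_pos hchk]
            rw [ih, min_ify]
            ring_nf
          · rw [if_neg hchk, if_neg hchk]
        · rw [if_neg hc, if_neg hc]
      have hB : (tableB d).foldl (fun best e =>
            if e.2.1 == targetB j then
              let nj := e.2.2.foldl (fun nj dec =>
                PySem.List.pySetD nj dec (PySem.List.pyGetD nj dec 0 - 1)) j
              if nj.all (fun v => decide (0 ≤ v) && (PySem.Int.mod v 2 == 0)) then
                min best (2 * solveB (tableB d) fuel (nj.map (fun v => PySem.Int.floordiv v 2)) + e.1)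
              else best
            else best) 9999999999999
          = (S2 d.keys).foldl (Gstep d (tableB d) fuel (tgtP j) j) 9999999999999 := by
        rw [tableB_eq, List.foldl_map]
        refine PySem.List.foldl_congr_mem _ _ _ _ (fun acc c _ => ?_)
        unfold Gstep entryOf
        rw [targetB_eq]
      rw [hA, hB]
      -- move across the permutation, absorbing the empty combo
      have hnil : Gstep d (tableB d) fuel (tgtP j) j 9999999999999 [] = 9999999999999 := by
        unfold Gstep
        rw [if_neg ?_]
        simp only [List.foldl_nil, beq_iff_eq]
        have := tgtP_pos j h1
        omega
      have hperm := comboList_perm d.keys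
      haveI : RightCommutative (Gstep d (tableB d) fuel (tgtP j) j) :=
        ⟨fun a c1 c2 => Gstep_rcomm d (tableB d) fuel (tgtP j) j a c1 c2⟩
      have := hperm.foldl_eq (f := Gstep d (tableB d) fuel (tgtP j) j) 9999999999999
      rw [List.foldl_cons, hnil] at this
      exact this

theorem main_core (btns : List (Int × List Int)) (fuel : Nat) (j : List Int) :
    solveA (PySem.Dict.ofList btns) (PySem.Dict.ofList btns).keys fuel j
      = solveB (tableB (PySem.Dict.ofList btns)) fuel j :=
  solve_eq (PySem.Dict.ofList btns) fuel j

-- ===== VERDICT (by name: the statement is the Claim_ definition above) =====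
theorem joltrec2_spec : Claim_equal_joltrec2 := by
  intro jolt btns _ _
  unfold Spec_joltrec2 joltrec2 joltrec2_alt
  exact main_core btns _ jolt
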